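-- pv_equiv track=rewrite | github.com/eostapenko-mipt/61753381 | lib/experiments.py | has_job_preemptions
-- ===== SOURCE A (Python) =====
-- import itertools
-- from collections import defaultdict
--
-- def get_job_time_slots(s):
--     # s: list = расписание
--     job_times = defaultdict(list)
--     for t, j in enumerate(s, start=1):
--         job_times[j].append(t)
--     return job_times
--
-- def is_job_intersects(j2, j1, job_times):
--     # j1: int = номер прерываемой работы
--     # j2: int = номер прерывающей работы
--     # job_times: get_job_time_slots()
--     if not job_times[j1] or not job_times[j2]:
--         return False
--     start = job_times[j1][0]
--     compl = job_times[j1][-1]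
--     for t in job_times[j2]:
--         if start < t < compl:
--             return True
--     return False
--
-- def has_job_preemptions(s, job_times=None):
--     # s: list = расписание
--     # job_times: get_job_time_slots()
--     if not job_times:
--         job_times = get_job_time_slots(s)
--     for j1, j2 in itertools.combinations(job_times.keys(), 2):
--         if (
--                 is_job_intersects(j2, j1, job_times)
--             or is_job_intersects(j1, j2, job_times)
--         ):
--             return True
--     return False
-- ===== SOURCE B (Python) =====
-- def has_job_preemptions(s, job_times=None):
--     if not job_times:
--         # Slots of the schedule s partition 1..len(s), so a job is preempted
--         # iff its slot set has a gap: last - first + 1 != number of its slots.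
--         seen = {}
--         for t, j in enumerate(s, start=1):
--             if j in seen:
--                 first, last, cnt = seen[j]
--                 seen[j] = (first, t, cnt + 1)
--             else:
--                 seen[j] = (t, t, 1)
--         return any(last - first + 1 != cnt for (first, last, cnt) in seen.values())
--     # General precomputed dict: some job's slot lies strictly inside
--     # another job's [first, last] span.
--     spans = [(j, ts[0], ts[-1]) for j, ts in job_times.items() if ts]
--     return any(j != j2 and lo < t < hi
--                for j2, ts in job_times.items() for t in ts
--                for j, lo, hi in spans)
-- ===== Notes on version B (the rewrite author's own statement) =====
-- stated objective: alternative
-- what changed: A tests every pair of jobs against each other's slot lists via itertools.combinations; B instead does a single (first,last,count) pass over the schedule and reports a preemption iff some job's slot range has a gap (last-first+1 != count), and for an explicitly supplied dict precomputes each job's span once and scans slots against that span list.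
import Mathlib
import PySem

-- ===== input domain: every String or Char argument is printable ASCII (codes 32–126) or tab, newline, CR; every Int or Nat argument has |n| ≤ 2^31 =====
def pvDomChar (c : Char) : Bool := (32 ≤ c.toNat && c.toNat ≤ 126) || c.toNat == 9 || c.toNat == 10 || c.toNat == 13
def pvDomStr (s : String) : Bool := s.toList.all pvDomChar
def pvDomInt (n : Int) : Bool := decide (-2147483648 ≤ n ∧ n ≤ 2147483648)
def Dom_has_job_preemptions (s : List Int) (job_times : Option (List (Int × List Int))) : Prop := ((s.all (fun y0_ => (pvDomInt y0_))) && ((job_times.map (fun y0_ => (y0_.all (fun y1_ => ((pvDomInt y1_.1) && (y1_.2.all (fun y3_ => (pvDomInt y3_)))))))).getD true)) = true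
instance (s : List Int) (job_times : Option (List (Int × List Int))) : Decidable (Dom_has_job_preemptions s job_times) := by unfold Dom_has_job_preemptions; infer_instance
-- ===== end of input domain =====

-- B replaces A's pairwise interval tests by a one-pass (first,last,count) gap scan when the
-- dict is computed from s, and by a precomputed span list otherwise; equivalence of return values is proved.

-- ===== PORT A =====
-- itertools.combinations(l, 2), in Python's order
def pvCombinations2 {α : Type} : List α → List (α × α)
  | [] => []
  | x :: xs => xs.map (fun y => (x, y)) ++ pvCombinations2 xs

def get_job_time_slots (s : List Int) : PySem.Dict Int (List Int) :=
  (PySem.List.enumerate s 1).foldl (fun d p => d.modify p.2 [] (fun ts => ts ++ [p.1])) PySem.Dict.empty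

def is_job_intersects (j2 j1 : Int) (jt : PySem.Dict Int (List Int)) : Bool :=
  let ts1 := jt.getD j1 []
  let ts2 := jt.getD j2 []
  if ts1.isEmpty || ts2.isEmpty then false
  else
    let start := PySem.List.pyGetD ts1 0 0
    let compl := PySem.List.pyGetD ts1 (-1) 0
    ts2.any (fun t => start < t && t < compl)

def has_job_preemptions (s : List Int) (job_times : Option (List (Int × List Int))) : Bool :=
  let d := match job_times with
    | none => get_job_time_slots s
    | some jt => if jt.isEmpty then get_job_time_slots s else PySem.Dict.mk jt
  (pvCombinations2 d.keys).any (fun p => is_job_intersects p.2 p.1 d || is_job_intersects p.1 p.2 d)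

-- ===== PORT B =====
-- one step of B's single pass: seen[j] = (first, last, count)
def pvSeenStep (d : PySem.Dict Int (Int × Int × Int)) (p : Int × Int) : PySem.Dict Int (Int × Int × Int) :=
  d.insert p.2 (match d.get? p.2 with
    | some (f, _, c) => (f, p.1, c + 1)
    | none => (p.1, p.1, 1))

def pvGapScan (s : List Int) : Bool :=
  let seen := (PySem.List.enumerate s 1).foldl pvSeenStep PySem.Dict.empty
  seen.values.any (fun v => decide (v.2.1 - v.1 + 1 ≠ v.2.2))

def pvSpans (jt : List (Int × List Int)) : List (Int × Int × Int) :=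
  jt.filterMap (fun q => if q.2.isEmpty then none
    else some (q.1, PySem.List.pyGetD q.2 0 0, PySem.List.pyGetD q.2 (-1) 0))

def has_job_preemptions_alt (s : List Int) (job_times : Option (List (Int × List Int))) : Bool :=
  match job_times with
  | none => pvGapScan s
  | some jt =>
    if jt.isEmpty then pvGapScan s
    else
      let spans := pvSpans jt
      jt.any (fun q => q.2.any (fun t => spans.any (fun r => (r.1 != q.1) && (r.2.1 < t && t < r.2.2))))

-- ===== PRECONDITION & SPEC =====
-- Pre_ excludes only association lists with duplicate keys, which do not represent a Python dict
-- (A's parameter is a dict, so such inputs can never reach the Python programs).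
def Pre_has_job_preemptions (s : List Int) (job_times : Option (List (Int × List Int))) : Prop :=
  ((job_times.getD []).map Prod.fst).Nodup
instance (s : List Int) (job_times : Option (List (Int × List Int))) : Decidable (Pre_has_job_preemptions s job_times) := by unfold Pre_has_job_preemptions; infer_instance
def pvWitness_has_job_preemptions : List Int × (Option (List (Int × List Int))) := ([1, 2, 1], none)
def Spec_has_job_preemptions (s : List Int) (job_times : Option (List (Int × List Int))) (out : Bool) : Prop := out = has_job_preemptions_alt s job_times
instance (s : List Int) (job_times : Option (List (Int × List Int))) (out : Bool) : Decidable (Spec_has_job_preemptions s job_times out) := by unfold Spec_has_job_preemptions; infer_instance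

-- ===== CLAIM (what is proved, stated in full; the proofs are below) =====
def Claim_equal_has_job_preemptions : Prop := ∀ (s : List Int) (job_times : Option (List (Int × List Int))), Dom_has_job_preemptions s job_times → Pre_has_job_preemptions s job_times → Spec_has_job_preemptions s job_times (has_job_preemptions s job_times)

-- ===== LEMMAS AND PROOFS =====

lemma pv_bool_ext {a b : Bool} (h : a = true ↔ b = true) : a = b := Bool.eq_iff_iff.mpr h

-- indices (0-based) at which s schedules job j
def pvIdx (s : List Int) (j : Int) : List Nat := (List.range s.length).filter (fun i => s.getD i 0 == j)

lemma pv_mem_pvIdx {s : List Int} {j : Int} {i : Nat} :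
    i ∈ pvIdx s j ↔ i < s.length ∧ s.getD i 0 = j := by
  simp [pvIdx, List.mem_filter, List.mem_range]

lemma pv_mem_iff {s : List Int} {j : Int} : j ∈ s ↔ pvIdx s j ≠ [] := by
  rw [← List.isEmpty_eq_false_iff, List.isEmpty_eq_false_iff_exists_mem]
  constructor
  · intro hj
    obtain ⟨i, hi, hgi⟩ := List.mem_iff_getElem.1 hj
    exact ⟨i, pv_mem_pvIdx.2 ⟨hi, by rw [List.getD_eq_getElem _ _ hi, hgi]⟩⟩
  · rintro ⟨i, hi⟩
    obtain ⟨hlt, hgd⟩ := pv_mem_pvIdx.1 hi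
    rw [List.getD_eq_getElem _ _ hlt] at hgd
    exact hgd ▸ List.getElem_mem hlt

lemma pv_pvIdx_sorted (s : List Int) (j : Int) : (pvIdx s j).Pairwise (· < ·) :=
  List.Pairwise.filter _ (List.pairwise_lt_range)

lemma pv_sorted_head_le {l : List Nat} (hl : l.Pairwise (· < ·)) {x : Nat} (hx : x ∈ l)
    (h : l ≠ []) : l.head h ≤ x := by
  cases l with
  | nil => exact absurd rfl h
  | cons a t =>
    rcases List.mem_cons.1 hx with rfl | hx
    · exact le_refl _
    · exact le_of_lt (List.rel_of_pairwise_cons hl hx)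

lemma pv_sorted_le_getLast {l : List Nat} (hl : l.Pairwise (· < ·)) {x : Nat} (hx : x ∈ l)
    (h : l ≠ []) : x ≤ l.getLast h := by
  induction l with
  | nil => exact absurd rfl h
  | cons a t ih =>
    cases t with
    | nil => simp at hx; simp [hx]
    | cons b u =>
      rw [List.getLast_cons (by simp)]
      rcases List.mem_cons.1 hx with rfl | hx
      · exact le_of_lt (List.rel_of_pairwise_cons hl (List.getLast_mem _))
      · exact ih (List.pairwise_cons.1 hl).2 hx (by simp)

-- enumerate(s, 1) written over range
lemma pv_enumerate_eq (s : List Int) (a : Int) :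
    PySem.List.enumerate s a = (List.range s.length).map (fun (i : Nat) => ((a + i : Int), s.getD i 0)) := by
  induction s generalizing a with
  | nil => simp [PySem.List.enumerate]
  | cons x t ih =>
    rw [PySem.List.enumerate_cons, ih]
    rw [List.length_cons, List.range_succ_eq_map, List.map_cons, List.map_map]
    refine congrArg₂ List.cons (by simp) ?_
    apply List.map_congr_left
    intro i _
    simp [Function.comp]
    ring

lemma pv_map_getD_range (s : List Int) :
    (List.range s.length).map (fun i => s.getD i 0) = s := by
  apply List.ext_getElem
  · simp
  · intro i h1 h2
    simp only [List.getElem_map, List.getElem_range]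
    exact List.getD_eq_getElem _ _ (by simpa using h2)

-- the times of job j, as they appear in both folds
lemma pv_times_eq (s : List Int) (j : Int) :
    ((PySem.List.enumerate s 1).filter (fun p => p.2 == j)).map Prod.fst
      = (pvIdx s j).map (fun (i : Nat) => ((1 : Int) + i)) := by
  rw [pv_enumerate_eq]
  rw [List.filter_map, List.map_map]
  rfl

-- the times list of job j in A's dict
lemma pv_getD_slots (s : List Int) (j : Int) :
    (get_job_time_slots s).getD j [] = (pvIdx s j).map (fun (i : Nat) => ((1 : Int) + i)) := by
  rw [get_job_time_slots, pv_enumerate_eq, List.foldl_map]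
  have h := PySem.Dict.getD_foldl_modify_append
    ((List.range s.length).map (fun (i : Nat) => (s.getD i 0, ((1 : Int) + i))))
    (PySem.Dict.empty) j
  rw [List.foldl_map] at h
  rw [show (List.foldl (fun d (i : Nat) =>
        d.modify ((fun (i : Nat) => ((1 + i : Int), s.getD i 0)) i).2 []
          fun ts => ts ++ [((fun (i : Nat) => ((1 + i : Int), s.getD i 0)) i).1])
        PySem.Dict.empty (List.range s.length))
      = (List.foldl (fun d (i : Nat) =>
        d.modify ((fun (i : Nat) => (s.getD i 0, (1 + i : Int))) i).1 []
          fun ts => ts ++ [((fun (i : Nat) => (s.getD i 0, (1 + i : Int))) i).2])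
        PySem.Dict.empty (List.range s.length)) from rfl]
  rw [h, PySem.Dict.getD_empty]
  rw [List.filter_map, List.map_map]
  rfl

lemma pv_keys_slots (s : List Int) :
    (get_job_time_slots s).keys = PySem.Set.ofList s := by
  rw [get_job_time_slots, pv_enumerate_eq, List.foldl_map]
  have h := PySem.Dict.keys_foldl_modify_key (List.range s.length)
    (fun (i : Nat) => s.getD i 0) ([] : List Int)
    (fun _ (i : Nat) ts => ts ++ [((1 : Int) + i)]) PySem.Dict.empty
  rw [show (List.foldl (fun d (i : Nat) =>
        d.modify ((fun (i : Nat) => ((1 + i : Int), s.getD i 0)) i).2 []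
          fun ts => ts ++ [((fun (i : Nat) => ((1 + i : Int), s.getD i 0)) i).1])
        PySem.Dict.empty (List.range s.length))
      = (List.foldl (fun d (i : Nat) =>
        d.modify (s.getD i 0) [] ((fun _ (i : Nat) ts => ts ++ [((1 : Int) + i)]) d i))
        PySem.Dict.empty (List.range s.length)) from rfl]
  rw [h, pv_map_getD_range]
  exact PySem.Set.update_nil_left s

lemma pv_nodup_keys_slots (s : List Int) : (get_job_time_slots s).keys.Nodup := by
  rw [pv_keys_slots]; exact PySem.Set.nodup_ofList s

-- B's single-pass dict, characterised
def pvTriple : List Int → Option (Int × Int × Int)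
  | [] => none
  | t :: ts => some (t, (t :: ts).getLast (by simp), ((t :: ts).length : Int))

lemma pv_pvTriple_append (ts : List Int) (x : Int) :
    pvTriple (ts ++ [x])
      = some (match pvTriple ts with
          | none => (x, x, 1)
          | some (f, _, c) => (f, x, c + 1)) := by
  cases ts with
  | nil => simp [pvTriple]
  | cons t ts' =>
    simp only [List.cons_append, pvTriple]
    refine congrArg some (congrArg₂ Prod.mk rfl (congrArg₂ Prod.mk ?_ ?_))
    · exact List.getLast_concat (l := t :: ts')
    · simp only [List.length_cons, List.length_append, List.length_cons, List.length_nil]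
      push_cast; ring

lemma pv_seen_get? (l : List (Int × Int)) (j : Int) :
    (l.foldl pvSeenStep PySem.Dict.empty).get? j
      = pvTriple ((l.filter (fun p => p.2 == j)).map Prod.fst) := by
  induction l using List.reverseRecOn with
  | nil => simp [PySem.Dict.get?_empty, pvTriple]
  | append_singleton l p ih =>
    rw [List.foldl_append, List.foldl_cons, List.foldl_nil]
    show (PySem.Dict.insert _ p.2 _).get? j = _
    rw [PySem.Dict.get?_insert, List.filter_append]
    by_cases hj : j = p.2
    · subst hj
      rw [if_pos rfl]
      have hf : List.filter (fun q => q.2 == p.2) [p] = [p] := by simp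
      rw [hf, List.map_append, List.map_cons, List.map_nil, pv_pvTriple_append, ih]
      cases pvTriple (List.map Prod.fst (List.filter (fun q => q.2 == p.2) l)) with
      | none => rfl
      | some v => rcases v with ⟨f, l', c⟩; rfl
    · rw [if_neg hj]
      have : List.filter (fun p => p.2 == j) [p] = [] := by
        simp [Ne.symm hj]
      rw [this, List.append_nil, ih]

lemma pv_seen_keys (l : List (Int × Int)) :
    (l.foldl pvSeenStep PySem.Dict.empty).keys = PySem.Set.ofList (l.map Prod.snd) := by
  have h := PySem.Dict.keys_foldl_insert_key l (Prod.snd)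
    (fun d p => (match d.get? p.2 with
      | some (f, _, c) => (f, p.1, c + 1)
      | none => (p.1, p.1, 1) : Int × Int × Int)) PySem.Dict.empty
  rw [show l.foldl pvSeenStep PySem.Dict.empty
      = l.foldl (fun d p => d.insert p.2 (match d.get? p.2 with
          | some (f, _, c) => (f, p.1, c + 1)
          | none => (p.1, p.1, 1))) PySem.Dict.empty from rfl]
  rw [h]
  exact PySem.Set.update_nil_left _

lemma pv_seen_nodup (l : List (Int × Int)) :
    (l.foldl pvSeenStep PySem.Dict.empty).keys.Nodup := by
  rw [pv_seen_keys]; exact PySem.Set.nodup_ofList _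

-- the symmetric any over combinations
lemma pv_comb2_any {α : Type} (l : List α) (hl : l.Nodup) (P : α → α → Bool) :
    ((pvCombinations2 l).any (fun p => P p.1 p.2 || P p.2 p.1) = true)
      ↔ ∃ a ∈ l, ∃ b ∈ l, a ≠ b ∧ P a b = true := by
  induction l with
  | nil => simp [pvCombinations2]
  | cons x xs ih =>
    obtain ⟨hx, hnd⟩ := List.nodup_cons.1 hl
    have e1 : (pvCombinations2 (x :: xs)).any (fun p => P p.1 p.2 || P p.2 p.1)
        = ((xs.any fun y => P x y || P y x) || (pvCombinations2 xs).any (fun p => P p.1 p.2 || P p.2 p.1)) := by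
      simp only [pvCombinations2, List.any_append, List.any_map]
      rfl
    rw [e1, Bool.or_eq_true]
    constructor
    · intro h
      rcases h with h1 | h2
      · obtain ⟨y, hy, hPy⟩ := List.any_eq_true.1 h1
        have hxy : x ≠ y := fun he => hx (he ▸ hy)
        rw [Bool.or_eq_true] at hPy
        rcases hPy with hp | hp
        · exact ⟨x, List.mem_cons_self, y, List.mem_cons_of_mem _ hy, hxy, hp⟩
        · exact ⟨y, List.mem_cons_of_mem _ hy, x, List.mem_cons_self, hxy.symm, hp⟩
      · obtain ⟨a, ha, b, hb, hab, hP⟩ := (ih hnd).1 h2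
        exact ⟨a, List.mem_cons_of_mem _ ha, b, List.mem_cons_of_mem _ hb, hab, hP⟩
    · rintro ⟨a, ha, b, hb, hab, hP⟩
      by_cases hax : a = x
      · subst hax
        have hb' : b ∈ xs := by
          rcases List.mem_cons.1 hb with h | h
          · exact absurd h.symm hab
          · exact h
        exact Or.inl (List.any_eq_true.2 ⟨b, hb', by rw [Bool.or_eq_true]; exact Or.inl hP⟩)
      · have ha' : a ∈ xs := by
          rcases List.mem_cons.1 ha with h | h
          · exact absurd h hax
          · exact h
        by_cases hbx : b = x
        · subst hbx
          exact Or.inl (List.any_eq_true.2 ⟨a, ha', by rw [Bool.or_eq_true]; exact Or.inr hP⟩)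
        · have hb' : b ∈ xs := by
            rcases List.mem_cons.1 hb with h | h
            · exact absurd h hbx
            · exact h
          exact Or.inr ((ih hnd).2 ⟨a, ha', b, hb', hab, hP⟩)

lemma pv_inter_iff (j2 j1 : Int) (d : PySem.Dict Int (List Int)) :
    is_job_intersects j2 j1 d = true
      ↔ d.getD j1 [] ≠ [] ∧ ∃ t ∈ d.getD j2 [],
          PySem.List.pyGetD (d.getD j1 []) 0 0 < t ∧ t < PySem.List.pyGetD (d.getD j1 []) (-1) 0 := by
  rw [is_job_intersects]
  by_cases h1 : d.getD j1 [] = []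
  · simp [h1]
  · by_cases h2 : d.getD j2 [] = []
    · simp [h2]
    · simp only [List.isEmpty_iff, h1, h2, if_false, Bool.or_self, List.any_eq_true]
      simp [h1, h2]

-- A on a dict with distinct keys, as a proposition
lemma pv_A_iff (d : PySem.Dict Int (List Int)) (hnd : d.keys.Nodup) :
    ((pvCombinations2 d.keys).any (fun p => is_job_intersects p.2 p.1 d || is_job_intersects p.1 p.2 d) = true)
      ↔ ∃ j1 ∈ d.keys, ∃ j2 ∈ d.keys, j1 ≠ j2 ∧ is_job_intersects j2 j1 d = true := by
  exact pv_comb2_any d.keys hnd (fun a b => is_job_intersects b a d)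

-- the core counting fact: a gap in the slot list ⟺ some slot strictly inside the span is foreign
lemma pv_core (s : List Int) (j : Int) (h : pvIdx s j ≠ []) :
    ((pvIdx s j).getLast h + 1 - (pvIdx s j).head h ≠ (pvIdx s j).length)
      ↔ ∃ i, (pvIdx s j).head h < i ∧ i < (pvIdx s j).getLast h ∧ ¬ s.getD i 0 = j := by
  have hsort := pv_pvIdx_sorted s j
  set lo := (pvIdx s j).head h with hlo_def
  set hi := (pvIdx s j).getLast h with hhi_def
  have hlo_mem : lo ∈ pvIdx s j := List.head_mem h
  have hhi_mem : hi ∈ pvIdx s j := List.getLast_mem h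
  have hlo := pv_mem_pvIdx.1 hlo_mem
  have hhi := pv_mem_pvIdx.1 hhi_mem
  have hlohi : lo ≤ hi := pv_sorted_le_getLast hsort hlo_mem h
  have hbound : ∀ i ∈ pvIdx s j, lo ≤ i ∧ i ≤ hi := fun i hi' =>
    ⟨pv_sorted_head_le hsort hi' h, pv_sorted_le_getLast hsort hi' h⟩
  -- split range s.length around the window [lo, hi]
  have hsplit : List.range s.length
      = (List.range' 0 lo ++ List.range' lo (hi + 1 - lo)) ++ List.range' (hi + 1) (s.length - (hi + 1)) := by
    rw [List.range_eq_range']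
    have e1 : List.range' 0 lo ++ List.range' lo (hi + 1 - lo) = List.range' 0 (hi + 1) := by
      have := List.range'_append (s := 0) (m := lo) (n := hi + 1 - lo) (step := 1)
      simp only [one_mul, Nat.zero_add] at this
      rw [this]; congr 1; omega
    rw [e1]
    have := List.range'_append (s := 0) (m := hi + 1) (n := s.length - (hi + 1)) (step := 1)
    simp only [one_mul, Nat.zero_add] at this
    rw [this]; congr 1; omega
  have hlen : (pvIdx s j).length
      = List.countP (fun i => s.getD i 0 == j) (List.range' lo (hi + 1 - lo)) := by
    have : (pvIdx s j).length = List.countP (fun i => s.getD i 0 == j) (List.range s.length) := by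
      rw [pvIdx, ← List.countP_eq_length_filter]
    rw [this, hsplit, List.countP_append, List.countP_append]
    have hz1 : List.countP (fun i => s.getD i 0 == j) (List.range' 0 lo) = 0 := by
      rw [List.countP_eq_zero]
      intro i hi' hp
      have him : i ∈ pvIdx s j := pv_mem_pvIdx.2 ⟨by
          have := (List.mem_range'_1.1 hi').2; omega, by simpa using hp⟩
      have := (hbound i him).1
      have := (List.mem_range'_1.1 hi').2
      omega
    have hz2 : List.countP (fun i => s.getD i 0 == j) (List.range' (hi + 1) (s.length - (hi + 1))) = 0 := by
      rw [List.countP_eq_zero]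
      intro i hi' hp
      have him : i ∈ pvIdx s j := pv_mem_pvIdx.2 ⟨by
          have := (List.mem_range'_1.1 hi').2; omega, by simpa using hp⟩
      have := (hbound i him).2
      have := (List.mem_range'_1.1 hi').1
      omega
    omega
  constructor
  · intro hne
    have hcnt : List.countP (fun i => s.getD i 0 == j) (List.range' lo (hi + 1 - lo))
        ≠ (List.range' lo (hi + 1 - lo)).length := by
      rw [List.length_range']; omega
    have : ¬ ∀ i ∈ List.range' lo (hi + 1 - lo), (fun i => s.getD i 0 == j) i = true := by
      intro hall
      exact hcnt (List.countP_eq_length.2 hall)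
    push_neg at this
    obtain ⟨i, hi', hp⟩ := this
    have hrange := List.mem_range'_1.1 hi'
    have hp' : ¬ s.getD i 0 = j := by simpa using hp
    have hne_lo : i ≠ lo := fun he => hp' (by rw [he]; exact hlo.2)
    have hne_hi : i ≠ hi := fun he => hp' (by rw [he]; exact hhi.2)
    refine ⟨i, by omega, by omega, hp'⟩
  · rintro ⟨i, h1, h2, h3⟩
    have hi' : i ∈ List.range' lo (hi + 1 - lo) := List.mem_range'_1.2 ⟨by omega, by omega⟩
    have : List.countP (fun i => s.getD i 0 == j) (List.range' lo (hi + 1 - lo))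
        ≠ (List.range' lo (hi + 1 - lo)).length := by
      intro he
      have := List.countP_eq_length.1 he i hi'
      exact h3 (by simpa using this)
    rw [List.length_range'] at this
    omega

-- heads and lasts through the (1 + ·) map
lemma pv_map_head (I : List Nat) (h : I ≠ []) :
    PySem.List.pyGetD (I.map (fun (i : Nat) => ((1 : Int) + i))) 0 0 = 1 + (I.head h : Int) := by
  cases I with
  | nil => exact absurd rfl h
  | cons a t => simp [PySem.List.pyGetD_zero_cons]

lemma pv_map_last (I : List Nat) (h : I ≠ []) :
    PySem.List.pyGetD (I.map (fun (i : Nat) => ((1 : Int) + i))) (-1) 0 = 1 + (I.getLast h : Int) := by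
  have hm : I.map (fun (i : Nat) => ((1 : Int) + i)) ≠ [] := by simpa using h
  rw [PySem.List.pyGetD_neg_one _ _ hm, List.getLast_map]

-- B's gap scan as a proposition
lemma pv_gapScan_iff (s : List Int) :
    pvGapScan s = true ↔ ∃ j, ∃ (h : pvIdx s j ≠ []),
      ((pvIdx s j).getLast h + 1 - (pvIdx s j).head h ≠ (pvIdx s j).length) := by
  rw [pvGapScan]
  simp only [List.any_eq_true, decide_eq_true_eq]
  constructor
  · rintro ⟨v, hv, hcrit⟩
    rw [show (PySem.Dict.values ((PySem.List.enumerate s 1).foldl pvSeenStep PySem.Dict.empty))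
        = ((PySem.List.enumerate s 1).foldl pvSeenStep PySem.Dict.empty).items.map Prod.snd from rfl] at hv
    obtain ⟨⟨k, v'⟩, hkv, hv'⟩ := List.mem_map.1 hv
    cases hv'
    have hget : ((PySem.List.enumerate s 1).foldl pvSeenStep PySem.Dict.empty).get? k = some v' :=
      (PySem.Dict.get?_eq_some_iff_mem_items _ _ _ (pv_seen_nodup _)).2 hkv
    rw [pv_seen_get?, pv_times_eq] at hget
    have hne : pvIdx s k ≠ [] := by
      intro he; rw [he] at hget; simp [pvTriple] at hget
    refine ⟨k, hne, ?_⟩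
    obtain ⟨a, t, he⟩ := List.exists_cons_of_ne_nil hne
    have hmapne : (pvIdx s k).map (fun (i : Nat) => ((1 : Int) + i)) ≠ [] := by simpa using hne
    obtain ⟨b, u, hemap⟩ := List.exists_cons_of_ne_nil hmapne
    rw [hemap] at hget
    rw [pvTriple] at hget
    have hv'' := Option.some.inj hget
    -- v' = (head, last, length) of the mapped list
    have hhead : b = 1 + ((pvIdx s k).head hne : Int) := by
      have := pv_map_head (pvIdx s k) hne
      rw [hemap, PySem.List.pyGetD_zero_cons] at this
      exact this
    have hlast : (b :: u).getLast (by simp) = 1 + ((pvIdx s k).getLast hne : Int) := by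
      have := pv_map_last (pvIdx s k) hne
      rw [hemap, PySem.List.pyGetD_neg_one _ _ (by simp)] at this
      exact this
    have hlen : (b :: u).length = (pvIdx s k).length := by
      rw [← hemap, List.length_map]
    rw [← hv''] at hcrit
    dsimp only at hcrit
    rw [hlast, hlen, hhead] at hcrit
    have hlh : (pvIdx s k).head hne ≤ (pvIdx s k).getLast hne :=
      pv_sorted_le_getLast (pv_pvIdx_sorted s k) (List.head_mem hne) hne
    omega
  · rintro ⟨j, hne, hgap⟩
    have hget : ((PySem.List.enumerate s 1).foldl pvSeenStep PySem.Dict.empty).get? j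
        = pvTriple ((pvIdx s j).map (fun (i : Nat) => ((1 : Int) + i))) := by
      rw [pv_seen_get?, pv_times_eq]
    obtain ⟨b, u, hemap⟩ := List.exists_cons_of_ne_nil
      (show (pvIdx s j).map (fun (i : Nat) => ((1 : Int) + i)) ≠ [] by simpa using hne)
    rw [hemap, pvTriple] at hget
    refine ⟨(b, (b :: u).getLast (by simp), ((b :: u).length : Int)),
      List.mem_map.2 ⟨(j, _), PySem.Dict.mem_items_of_get?_eq_some _ hget, rfl⟩, ?_⟩
    have hhead : b = 1 + ((pvIdx s j).head hne : Int) := by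
      have := pv_map_head (pvIdx s j) hne
      rw [hemap, PySem.List.pyGetD_zero_cons] at this
      exact this
    have hlast : (b :: u).getLast (by simp) = 1 + ((pvIdx s j).getLast hne : Int) := by
      have := pv_map_last (pvIdx s j) hne
      rw [hemap, PySem.List.pyGetD_neg_one _ _ (by simp)] at this
      exact this
    have hlen : (b :: u).length = (pvIdx s j).length := by
      rw [← hemap, List.length_map]
    have hlh : (pvIdx s j).head hne ≤ (pvIdx s j).getLast hne :=
      pv_sorted_le_getLast (pv_pvIdx_sorted s j) (List.head_mem hne) hne
    dsimp only
    rw [hlast, hlen, hhead]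
    omega

-- a foreign slot strictly inside the span, with or without naming the other job
lemma pv_foreign (s : List Int) (j1 : Int) (h : pvIdx s j1 ≠ []) :
    (∃ j2 ∈ s, j1 ≠ j2 ∧ ∃ i ∈ pvIdx s j2,
        (pvIdx s j1).head h < i ∧ i < (pvIdx s j1).getLast h)
      ↔ ∃ i, (pvIdx s j1).head h < i ∧ i < (pvIdx s j1).getLast h ∧ ¬ s.getD i 0 = j1 := by
  constructor
  · rintro ⟨j2, _, hne, i, hi, h1, h2⟩
    obtain ⟨_, hgd⟩ := pv_mem_pvIdx.1 hi
    exact ⟨i, h1, h2, by rw [hgd]; exact fun he => hne he.symm⟩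
  · rintro ⟨i, h1, h2, h3⟩
    have hhi := pv_mem_pvIdx.1 (List.getLast_mem h)
    have hilen : i < s.length := by omega
    refine ⟨s.getD i 0, ?_, fun he => h3 he.symm, i, pv_mem_pvIdx.2 ⟨hilen, rfl⟩, h1, h2⟩
    rw [List.getD_eq_getElem _ _ hilen]
    exact List.getElem_mem hilen

-- branch 1: A on the computed dict equals B's gap scan
lemma pv_branch1 (s : List Int) :
    ((pvCombinations2 (get_job_time_slots s).keys).any
        (fun p => is_job_intersects p.2 p.1 (get_job_time_slots s)
          || is_job_intersects p.1 p.2 (get_job_time_slots s)))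
      = pvGapScan s := by
  apply pv_bool_ext
  rw [pv_A_iff _ (pv_nodup_keys_slots s), pv_gapScan_iff]
  constructor
  · rintro ⟨j1, hj1, j2, hj2, hne, hint⟩
    rw [pv_keys_slots, PySem.Set.mem_ofList] at hj1 hj2
    obtain ⟨hne1, t, ht, hb1, hb2⟩ := (pv_inter_iff j2 j1 _).1 hint
    rw [pv_getD_slots] at hne1 ht hb1 hb2
    have h1 : pvIdx s j1 ≠ [] := by simpa using hne1
    obtain ⟨i, hi, rfl⟩ := List.mem_map.1 ht
    rw [pv_map_head _ h1] at hb1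
    rw [pv_map_last _ h1] at hb2
    refine ⟨j1, h1, ?_⟩
    rw [pv_core s j1 h1]
    refine (pv_foreign s j1 h1).1 ⟨j2, hj2, hne, i, hi, by omega, by omega⟩
  · rintro ⟨j, hne, hgap⟩
    obtain ⟨i, h1, h2, h3⟩ := (pv_core s j hne).1 hgap
    obtain ⟨j2, hj2, hnej, i', hi', hb1, hb2⟩ := (pv_foreign s j hne).2 ⟨i, h1, h2, h3⟩
    refine ⟨j, ?_, j2, ?_, hnej, ?_⟩
    · rw [pv_keys_slots, PySem.Set.mem_ofList]; exact pv_mem_iff.2 hne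
    · rw [pv_keys_slots, PySem.Set.mem_ofList]; exact hj2
    · rw [pv_inter_iff]
      rw [pv_getD_slots, pv_getD_slots]
      refine ⟨by simpa using hne, (1 : Int) + i', List.mem_map.2 ⟨i', hi', rfl⟩, ?_, ?_⟩
      · rw [pv_map_head _ hne]; omega
      · rw [pv_map_last _ hne]; omega

-- branch 2: A on the given dict equals B's span scan
lemma pv_branch2 (jt : List (Int × List Int)) (hnd : (jt.map Prod.fst).Nodup) :
    ((pvCombinations2 (PySem.Dict.mk jt).keys).any
        (fun p => is_job_intersects p.2 p.1 (PySem.Dict.mk jt)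
          || is_job_intersects p.1 p.2 (PySem.Dict.mk jt)))
      = jt.any (fun q => q.2.any (fun t => (pvSpans jt).any
          (fun r => (r.1 != q.1) && (r.2.1 < t && t < r.2.2)))) := by
  have hkeys : (PySem.Dict.mk jt).keys = jt.map Prod.fst := rfl
  have hnd' : (PySem.Dict.mk jt).keys.Nodup := by rw [hkeys]; exact hnd
  have hgetD : ∀ p ∈ jt, (PySem.Dict.mk jt).getD p.1 [] = p.2 := by
    intro p hp
    exact PySem.Dict.getD_of_mem_items _ (by exact hp) hnd' []
  apply pv_bool_ext
  rw [pv_A_iff _ hnd']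
  simp only [List.any_eq_true, Bool.and_eq_true, bne_iff_ne, decide_eq_true_eq]
  constructor
  · rintro ⟨j1, hj1, j2, hj2, hne, hint⟩
    obtain ⟨hne1, t, ht, hb1, hb2⟩ := (pv_inter_iff j2 j1 _).1 hint
    rw [hkeys] at hj1 hj2
    obtain ⟨p1, hp1, hp1e⟩ := List.mem_map.1 hj1
    obtain ⟨p2, hp2, hp2e⟩ := List.mem_map.1 hj2
    rw [← hp1e, hgetD p1 hp1] at hne1 hb1 hb2
    rw [← hp2e, hgetD p2 hp2] at ht
    refine ⟨p2, hp2, t, ht, (p1.1, PySem.List.pyGetD p1.2 0 0, PySem.List.pyGetD p1.2 (-1) 0), ?_, ?_, hb1, hb2⟩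
    · rw [pvSpans]
      exact List.mem_filterMap.2 ⟨p1, hp1, by rw [if_neg (by simpa using hne1)]⟩
    · show p1.1 ≠ p2.1
      rw [hp1e, hp2e]; exact hne
  · rintro ⟨q, hq, t, ht, r, hr, hrne, hb1, hb2⟩
    rw [pvSpans] at hr
    obtain ⟨p1, hp1, hp1e⟩ := List.mem_filterMap.1 hr
    by_cases hemp : p1.2.isEmpty
    · rw [if_pos hemp] at hp1e; exact absurd hp1e (by simp)
    · rw [if_neg hemp] at hp1e
      have hre := Option.some.inj hp1e
      refine ⟨p1.1, hkeys ▸ List.mem_map.2 ⟨p1, hp1, rfl⟩,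
        q.1, hkeys ▸ List.mem_map.2 ⟨q, hq, rfl⟩, ?_, ?_⟩
      · intro he; exact hrne (by rw [← hre]; exact he)
      · rw [pv_inter_iff, hgetD p1 hp1, hgetD q hq]
        refine ⟨by simpa using hemp, t, ht, ?_, ?_⟩
        · rw [show PySem.List.pyGetD p1.2 0 0 = r.2.1 from by rw [← hre]]
          exact hb1
        · rw [show PySem.List.pyGetD p1.2 (-1) 0 = r.2.2 from by rw [← hre]]
          exact hb2

-- ===== VERDICT (by name: the statement is the Claim_ definition above) =====
theorem has_job_preemptions_spec : Claim_equal_has_job_preemptions := by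
  intro s job_times _ hpre
  unfold Spec_has_job_preemptions has_job_preemptions has_job_preemptions_alt
  match job_times with
  | none => exact pv_branch1 s
  | some jt =>
    by_cases hjt : jt.isEmpty
    · simp only [hjt, if_true]
      exact pv_branch1 s
    · simp only [hjt]
      exact pv_branch2 jt (by simpa [Pre_has_job_preemptions] using hpre)
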